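-- pv_equiv track=rewrite | github.com/ljstrnadiii/rayzin | src/rayzin/selectors.py | _coalesce_indices_to_intervals
-- ===== SOURCE A (Python) =====
-- from typing import TypeAlias
--
-- Interval: TypeAlias = tuple[int, int]
--
-- def _coalesce_indices_to_intervals(indices: list[int], chunk_size: int) -> list[Interval]:
--     if not indices:
--         return []
--
--     unique_indices = sorted(set(indices))
--     merged: list[Interval] = []
--     start = unique_indices[0]
--     stop = start + 1
--     for index in unique_indices[1:]:
--         if index == stop:
--             stop += 1
--             continue
--         merged.extend(_split_interval_on_chunk_boundaries(start, stop, chunk_size))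
--         start = index
--         stop = index + 1
--     merged.extend(_split_interval_on_chunk_boundaries(start, stop, chunk_size))
--     return merged
--
-- def _split_interval_on_chunk_boundaries(start: int, stop: int, chunk_size: int) -> list[Interval]:
--     if start >= stop:
--         return []
--
--     intervals: list[Interval] = []
--     current = start
--     while current < stop:
--         next_boundary = ((current // chunk_size) + 1) * chunk_size
--         next_stop = min(stop, next_boundary)
--         intervals.append((int(current), int(next_stop)))
--         current = next_stop
--     return intervals
-- ===== SOURCE B (Python) =====
-- def _coalesce_indices_to_intervals(indices, chunk_size):
--     unique_indices = sorted(set(indices))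
--     if not unique_indices:
--         return []
--     intervals = []
--     start = unique_indices[0]
--     stop = start + 1
--     for index in unique_indices[1:]:
--         if index == stop and index % chunk_size != 0:
--             stop += 1
--         else:
--             intervals.append((start, stop))
--             start, stop = index, index + 1
--     intervals.append((start, stop))
--     return intervals
-- ===== Notes on version B (the rewrite author's own statement) =====
-- stated objective: simpler
-- what changed: A merges runs and then re-splits each run with a helper while-loop over chunk boundaries; B drops the helper entirely and does one fused pass that starts a new interval whenever the next index is not consecutive or sits on a chunk boundary (index % chunk_size == 0).
import Mathlib
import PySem

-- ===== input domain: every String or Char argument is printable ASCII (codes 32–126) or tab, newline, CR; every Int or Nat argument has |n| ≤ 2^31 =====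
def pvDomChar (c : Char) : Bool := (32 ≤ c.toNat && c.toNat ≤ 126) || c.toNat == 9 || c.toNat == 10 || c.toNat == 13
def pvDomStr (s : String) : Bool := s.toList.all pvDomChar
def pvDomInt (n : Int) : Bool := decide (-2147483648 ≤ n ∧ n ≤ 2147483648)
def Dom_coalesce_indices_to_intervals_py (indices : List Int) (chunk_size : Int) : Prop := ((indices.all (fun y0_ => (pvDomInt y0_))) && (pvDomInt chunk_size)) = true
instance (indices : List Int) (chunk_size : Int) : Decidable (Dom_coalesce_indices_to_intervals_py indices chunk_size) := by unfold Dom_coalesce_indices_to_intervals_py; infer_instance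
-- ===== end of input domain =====

-- B replaces A's merge-then-resplit (helper while-loop over chunk boundaries) by one fused pass
-- that starts a new interval at any gap or chunk boundary; objective: simpler.

-- ===== PORT A =====
-- next_boundary = ((current // chunk_size) + 1) * chunk_size
def pvNextBoundary (current cs : Int) : Int := (PySem.Int.floordiv current cs + 1) * cs

-- the 'while current < stop' loop of _split_interval_on_chunk_boundaries, with fuel
-- (stop - current).toNat: when 0 < cs each step advances current by at least 1, so the
-- fuel never runs out on inputs admitted by Pre_; the fuel guard only makes it total.
def pvSplitLoop : Nat → Int → Int → Int → List (Int × Int)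
  | 0, _, _, _ => []
  | f + 1, current, stop, cs =>
    if current < stop then
      let ns := min stop (pvNextBoundary current cs)
      (current, ns) :: pvSplitLoop f ns stop cs
    else []

-- _split_interval_on_chunk_boundaries
def pvSplit (start stop cs : Int) : List (Int × Int) :=
  if start ≥ stop then [] else pvSplitLoop (stop - start).toNat start stop cs

-- body of A's for-loop; state = (merged, start, stop)
def pvStepA (cs : Int) (acc : List (Int × Int) × Int × Int) (index : Int) : List (Int × Int) × Int × Int :=
  if index = acc.2.2 then (acc.1, acc.2.1, acc.2.2 + 1)
  else (acc.1 ++ pvSplit acc.2.1 acc.2.2 cs, index, index + 1)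

def coalesce_indices_to_intervals_py (indices : List Int) (chunk_size : Int) : List (Int × Int) :=
  if indices = [] then []
  else
    match PySem.List.sorted (PySem.Set.ofList indices) (fun x => x) false with
    | [] => []   -- unreachable: indices ≠ []
    | h :: t =>
      let r := t.foldl (pvStepA chunk_size) ([], h, h + 1)
      r.1 ++ pvSplit r.2.1 r.2.2 chunk_size

-- ===== PORT B =====
-- body of B's single loop; state = (intervals, start, stop)
def pvStepB (cs : Int) (acc : List (Int × Int) × Int × Int) (index : Int) : List (Int × Int) × Int × Int :=
  if index = acc.2.2 ∧ PySem.Int.mod index cs ≠ 0 then (acc.1, acc.2.1, acc.2.2 + 1)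
  else (acc.1 ++ [(acc.2.1, acc.2.2)], index, index + 1)

def coalesce_indices_to_intervals_py_alt (indices : List Int) (chunk_size : Int) : List (Int × Int) :=
  match PySem.List.sorted (PySem.Set.ofList indices) (fun x => x) false with
  | [] => []
  | h :: t =>
    let r := t.foldl (pvStepB chunk_size) ([], h, h + 1)
    r.1 ++ [(r.2.1, r.2.2)]

-- ===== PRECONDITION & SPEC =====
-- On non-empty indices A raises ZeroDivisionError when chunk_size = 0 and its while-loop never
-- terminates when chunk_size < 0; Pre_ excludes exactly those inputs (A returns nowhere outside Pre_).
def Pre_coalesce_indices_to_intervals_py (indices : List Int) (chunk_size : Int) : Prop :=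
  indices = [] ∨ 0 < chunk_size
instance (indices : List Int) (chunk_size : Int) : Decidable (Pre_coalesce_indices_to_intervals_py indices chunk_size) := by unfold Pre_coalesce_indices_to_intervals_py; infer_instance

def pvWitness_coalesce_indices_to_intervals_py : List Int × Int := ([1, 2, 5, 2], 2)

def Spec_coalesce_indices_to_intervals_py (indices : List Int) (chunk_size : Int) (out : List (Int × Int)) : Prop := out = coalesce_indices_to_intervals_py_alt indices chunk_size
instance (indices : List Int) (chunk_size : Int) (out : List (Int × Int)) : Decidable (Spec_coalesce_indices_to_intervals_py indices chunk_size out) := by unfold Spec_coalesce_indices_to_intervals_py; infer_instance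

-- ===== CLAIM (what is proved, stated in full; the proofs are below) =====
def Claim_equal_coalesce_indices_to_intervals_py : Prop := ∀ (indices : List Int) (chunk_size : Int), Dom_coalesce_indices_to_intervals_py indices chunk_size → Pre_coalesce_indices_to_intervals_py indices chunk_size → Spec_coalesce_indices_to_intervals_py indices chunk_size (coalesce_indices_to_intervals_py indices chunk_size)

-- ===== LEMMAS AND PROOFS =====

-- 0 < cs → current < pvNextBoundary current cs ≤ current + cs
lemma pvNB_gt (cs current : Int) (hcs : 0 < cs) : current < pvNextBoundary current cs := by
  have h1 := PySem.Int.floordiv_mul_add_mod current cs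
  have h2 := PySem.Int.mod_lt current hcs
  unfold pvNextBoundary
  nlinarith

lemma pvNB_mod_zero (cs m : Int) (hm : PySem.Int.mod m cs = 0) :
    pvNextBoundary m cs = m + cs := by
  have h1 := PySem.Int.floordiv_mul_add_mod m cs
  unfold pvNextBoundary
  nlinarith

-- boundary above s is the least multiple of cs strictly above s
lemma pvNB_le_of_mod_zero (cs s m : Int) (hcs : 0 < cs)
    (hm : PySem.Int.mod m cs = 0) (hsm : s < m) : pvNextBoundary s cs ≤ m := by
  have h1 := PySem.Int.floordiv_mul_add_mod s cs
  have h2 := PySem.Int.mod_nonneg s hcs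
  have h3 := PySem.Int.floordiv_mul_add_mod m cs
  have hlt : PySem.Int.floordiv s cs < PySem.Int.floordiv m cs := by nlinarith
  have : PySem.Int.floordiv s cs + 1 ≤ PySem.Int.floordiv m cs := hlt
  unfold pvNextBoundary
  nlinarith

lemma pvSplitLoop_stop (f : Nat) (current stop cs : Int) (h : ¬ current < stop) :
    pvSplitLoop f current stop cs = [] := by
  cases f with
  | zero => rfl
  | succ f => simp [pvSplitLoop, h]

-- fuel irrelevance (0 < cs)
lemma pvSplitLoop_fuel (cs : Int) (hcs : 0 < cs) :
    ∀ (f g : Nat) (current stop : Int), (stop - current).toNat ≤ f → (stop - current).toNat ≤ g →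
    pvSplitLoop f current stop cs = pvSplitLoop g current stop cs := by
  intro f
  induction f with
  | zero =>
    intro g current stop hf hg
    have : ¬ current < stop := by omega
    rw [pvSplitLoop_stop _ _ _ _ this, pvSplitLoop_stop _ _ _ _ this]
  | succ f ih =>
    intro g current stop hf hg
    by_cases h : current < stop
    · have hg1 : ∃ g', g = g' + 1 := by
        cases g with
        | zero => omega
        | succ g' => exact ⟨g', rfl⟩
      obtain ⟨g', rfl⟩ := hg1
      simp only [pvSplitLoop, h, if_pos]
      have hnb := pvNB_gt cs current hcs
      have hfs : (stop - min stop (pvNextBoundary current cs)).toNat ≤ f := by omega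
      have hgs : (stop - min stop (pvNextBoundary current cs)).toNat ≤ g' := by omega
      rw [ih g' _ _ hfs hgs]
    · rw [pvSplitLoop_stop _ _ _ _ h, pvSplitLoop_stop _ _ _ _ h]

-- one unfolding of pvSplit (0 < cs)
lemma pvSplit_cons (cs s st : Int) (hcs : 0 < cs) (h : s < st) :
    pvSplit s st cs = (s, min st (pvNextBoundary s cs)) :: pvSplit (min st (pvNextBoundary s cs)) st cs := by
  have hfuel : (st - s).toNat = ((st - s).toNat - 1) + 1 := by omega
  unfold pvSplit
  rw [if_neg (by omega), hfuel]
  simp only [pvSplitLoop, h, if_pos]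
  set ns := min st (pvNextBoundary s cs) with hns
  have hnb := pvNB_gt cs s hcs
  by_cases h2 : ns < st
  · rw [if_neg (by omega)]
    exact congrArg _ (pvSplitLoop_fuel cs hcs _ _ ns st (by omega) (by omega))
  · rw [if_pos (by omega)]
    exact congrArg _ (pvSplitLoop_stop _ _ _ _ h2)

lemma pvSplit_nil (cs s st : Int) (h : st ≤ s) : pvSplit s st cs = [] := by
  unfold pvSplit
  rw [if_pos (by omega)]

-- single piece when no boundary strictly inside
lemma pvSplit_single (cs m st : Int) (hcs : 0 < cs) (h : m < st)
    (hb : st ≤ pvNextBoundary m cs) :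
    pvSplit m st cs = [(m, st)] := by
  rw [pvSplit_cons cs m st hcs h]
  have : min st (pvNextBoundary m cs) = st := by omega
  rw [this, pvSplit_nil cs st st (le_refl st)]

-- concatenation at a boundary m
lemma pvSplit_concat (cs : Int) (hcs : 0 < cs) :
    ∀ (k : Nat) (s m st : Int), (m - s).toNat ≤ k → s ≤ m → m ≤ st → PySem.Int.mod m cs = 0 →
    pvSplit s st cs = pvSplit s m cs ++ pvSplit m st cs := by
  intro k
  induction k with
  | zero =>
    intro s m st hk hsm hmst hm
    have : m = s := by omega
    subst this
    rw [pvSplit_nil cs m m (le_refl m)]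
    simp
  | succ k ih =>
    intro s m st hk hsm hmst hm
    by_cases hse : s = m
    · subst hse
      rw [pvSplit_nil cs s s (le_refl s)]
      simp
    · have hsm' : s < m := by omega
      have hnb : pvNextBoundary s cs ≤ m := pvNB_le_of_mod_zero cs s m hcs hm hsm'
      have hnbgt := pvNB_gt cs s hcs
      have hmin1 : min st (pvNextBoundary s cs) = pvNextBoundary s cs := by omega
      have hmin2 : min m (pvNextBoundary s cs) = pvNextBoundary s cs := by omega
      rw [pvSplit_cons cs s st hcs (by omega), pvSplit_cons cs s m hcs hsm', hmin1, hmin2]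
      rw [ih (pvNextBoundary s cs) m st (by omega) hnb hmst hm]
      simp

-- the decomposition used by the loop invariant
lemma pvSplit_decomp (cs s sB st : Int) (hcs : 0 < cs) (h1 : s ≤ sB) (h2 : sB < st)
    (h3 : sB = s ∨ PySem.Int.mod sB cs = 0) (h4 : st ≤ pvNextBoundary sB cs) :
    pvSplit s st cs = pvSplit s sB cs ++ [(sB, st)] := by
  rcases h3 with h3 | h3
  · subst h3
    rw [pvSplit_nil cs sB sB (le_refl sB), pvSplit_single cs sB st hcs h2 h4]
    simp
  · rw [pvSplit_concat cs hcs (sB - s).toNat s sB st (le_refl _) h1 (by omega) h3,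
        pvSplit_single cs sB st hcs h2 h4]

-- mod st cs = 0 is exactly "st is a multiple of cs"; if nb sB = st then mod st cs = 0
lemma pvNB_mod (cs sB : Int) : PySem.Int.mod (pvNextBoundary sB cs) cs = 0 := by
  rw [PySem.Int.mod_eq_zero_iff_dvd]
  exact ⟨PySem.Int.floordiv sB cs + 1, mul_comm _ _⟩

-- the main loop correspondence
lemma pvLoop_eq (cs : Int) (hcs : 0 < cs) :
    ∀ (t : List Int) (mA mB : List (Int × Int)) (s sB st : Int),
    s ≤ sB → sB < st → (sB = s ∨ PySem.Int.mod sB cs = 0) → st ≤ pvNextBoundary sB cs →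
    mB = mA ++ pvSplit s sB cs →
    List.IsChain (· < ·) ((st - 1) :: t) →
    (t.foldl (pvStepA cs) (mA, s, st)).1 ++
      pvSplit (t.foldl (pvStepA cs) (mA, s, st)).2.1 (t.foldl (pvStepA cs) (mA, s, st)).2.2 cs =
    (t.foldl (pvStepB cs) (mB, sB, st)).1 ++
      [((t.foldl (pvStepB cs) (mB, sB, st)).2.1, (t.foldl (pvStepB cs) (mB, sB, st)).2.2)] := by
  intro t
  induction t with
  | nil =>
    intro mA mB s sB st h1 h2 h3 h4 hm hch
    simp only [List.foldl_nil]
    rw [pvSplit_decomp cs s sB st hcs h1 h2 h3 h4, hm]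
    simp
  | cons i t ih =>
    intro mA mB s sB st h1 h2 h3 h4 hm hch
    rw [List.isChain_cons_cons] at hch
    obtain ⟨hlt, hch⟩ := hch
    have hist : st ≤ i := by omega
    simp only [List.foldl_cons]
    by_cases heq : i = st
    · subst heq
      by_cases hmod : PySem.Int.mod i cs = 0
      · -- A extends, B starts a new interval at the boundary i = st
        have hA : pvStepA cs (mA, s, i) i = (mA, s, i + 1) := by
          simp [pvStepA]
        have hB : pvStepB cs (mB, sB, i) i = (mB ++ [(sB, i)], i, i + 1) := by
          simp [pvStepB, hmod]
        rw [hA, hB]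
        have hnb : pvNextBoundary i cs = i + cs := pvNB_mod_zero cs i hmod
        refine ih mA (mB ++ [(sB, i)]) s i (i + 1) (by omega) (by omega) (Or.inr hmod)
          (by omega) ?_ (by simpa using hch)
        
        rw [pvSplit_decomp cs s sB i hcs h1 h2 h3 h4, hm]
        simp
      · -- both extend
        have hA : pvStepA cs (mA, s, i) i = (mA, s, i + 1) := by
          simp [pvStepA]
        have hB : pvStepB cs (mB, sB, i) i = (mB, sB, i + 1) := by
          simp [pvStepB, hmod]
        rw [hA, hB]
        have hne : pvNextBoundary sB cs ≠ i := by
          intro h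
          exact hmod (h ▸ pvNB_mod cs sB)
        refine ih mA mB s sB (i + 1) h1 (by omega) h3 (by omega) hm (by simpa using hch)
    · -- gap: both flush and restart at i
      have hsti : st < i := by omega
      have hA : pvStepA cs (mA, s, st) i = (mA ++ pvSplit s st cs, i, i + 1) := by
        simp [pvStepA, heq]
      have hB : pvStepB cs (mB, sB, st) i = (mB ++ [(sB, st)], i, i + 1) := by
        simp [pvStepB, heq]
      rw [hA, hB]
      have hnb := pvNB_gt cs i hcs
      refine ih (mA ++ pvSplit s st cs) (mB ++ [(sB, st)]) i i (i + 1) (le_refl i)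
        (by omega) (Or.inl rfl) (by omega) ?_ ?_
      · rw [hm, pvSplit_nil cs i i (le_refl i), pvSplit_decomp cs s sB st hcs h1 h2 h3 h4]
        simp
      · cases t with
        | nil => simp
        | cons j t' =>
          rw [List.isChain_cons_cons] at hch ⊢
          exact ⟨by omega, hch.2⟩

-- ===== VERDICT (by name: the statement is the Claim_ definition above) =====
theorem coalesce_indices_to_intervals_py_spec : Claim_equal_coalesce_indices_to_intervals_py := by
  intro indices cs _ hpre
  unfold Spec_coalesce_indices_to_intervals_py
  by_cases hnil : indices = []
  · subst hnil
    rfl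
  · have hcs : 0 < cs := by
      rcases hpre with h | h
      · exact absurd h hnil
      · exact h
    unfold coalesce_indices_to_intervals_py coalesce_indices_to_intervals_py_alt
    rw [if_neg hnil]
    have hpw := PySem.List.sorted_ofList_pairwise_lt (xs := indices)
    cases hu : PySem.List.sorted (PySem.Set.ofList indices) (fun x => x) false with
    | nil => rfl
    | cons h t =>
      rw [hu] at hpw
      have hch' : List.IsChain (· < ·) ((h + 1 - 1) :: t) := by
        simpa using hpw.isChain
      have := pvLoop_eq cs hcs t [] [] h h (h + 1) (le_refl h) (by omega) (Or.inl rfl)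
        (by have := pvNB_gt cs h hcs; omega)
        (by rw [pvSplit_nil cs h h (le_refl h)]; simp) hch'
      simpa using this
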